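-- pv_equiv track=rewrite | github.com/abdirfan/Chatbot | project_p3.py | summarize_analysis
-- ===== SOURCE A (Python) =====
-- def summarize_analysis(num_words, wps, num_pronouns, num_prp, num_articles, num_past, num_future, num_prep, num_negations):
--     informative_correlates = []
--
--     # Creating a reference dictionary with keys = linguistic features, and values = psychological correlates.
--     # informative_correlates should hold a subset of three values from this dictionary.
--     # DO NOT change these values for autograder to work correctly
--     psychological_correlates = {}
--     psychological_correlates["num_words"] = "Talkativeness, verbal fluency"
--     psychological_correlates["wps"] = "Verbal fluency, cognitive complexity"
--     psychological_correlates["num_pronouns"] = "Informal, personal"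
--     psychological_correlates["num_prp"] = "Personal, social"
--     psychological_correlates["num_articles"] = "Use of concrete nouns, interest in objects/things"
--     psychological_correlates["num_past"] = "Focused on the past"
--     psychological_correlates["num_future"] = "Future and goal-oriented"
--     psychological_correlates["num_prep"] = "Education, concern with precision"
--     psychological_correlates["num_negations"] = "Inhibition"
--
--     # Set thresholds
--     num_words_threshold = 100
--     wps_threshold = 20
--
--     # [YOUR CODE HERE]
--     # Check if num_words and wps exceed thresholds
--     if num_words > num_words_threshold:
--         informative_correlates.append(psychological_correlates["num_words"])
--     if wps > wps_threshold:
--         informative_correlates.append(psychological_correlates["wps"])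
--
--     # Sort remaining linguistic features by frequency
--     feature_counts = {
--         "num_pronouns": num_pronouns,
--         "num_prp": num_prp,
--         "num_articles": num_articles,
--         "num_past": num_past,
--         "num_future": num_future,
--         "num_prep": num_prep,
--         "num_negations": num_negations,
--     }
--
--     # Sort features by frequency in descending order
--     sorted_features = sorted(feature_counts.items(), key=lambda item: item[1], reverse=True)
--
--     # Add the most frequent features to informative_correlates until it has 3 elements
--     for feature, count in sorted_features:
--         if len(informative_correlates) < 3:
--             informative_correlates.append(psychological_correlates[feature])
--         else:
--             break
--
--     return informative_correlates
-- ===== SOURCE B (Python) =====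
-- def summarize_analysis(num_words, wps, num_pronouns, num_prp, num_articles, num_past, num_future, num_prep, num_negations):
--     psychological_correlates = {
--         "num_words": "Talkativeness, verbal fluency",
--         "wps": "Verbal fluency, cognitive complexity",
--         "num_pronouns": "Informal, personal",
--         "num_prp": "Personal, social",
--         "num_articles": "Use of concrete nouns, interest in objects/things",
--         "num_past": "Focused on the past",
--         "num_future": "Future and goal-oriented",
--         "num_prep": "Education, concern with precision",
--         "num_negations": "Inhibition",
--     }
--
--     informative_correlates = []
--     if num_words > 100:
--         informative_correlates.append(psychological_correlates["num_words"])
--     if wps > 20: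
--         informative_correlates.append(psychological_correlates["wps"])
--
--     # Single pass: keep only the `needed` best (feature, count) pairs in a small
--     # buffer, ordered by descending count; a new pair goes AFTER equal counts,
--     # so earlier features win ties.
--     needed = 3 - len(informative_correlates)
--     features = [
--         ("num_pronouns", num_pronouns),
--         ("num_prp", num_prp),
--         ("num_articles", num_articles),
--         ("num_past", num_past),
--         ("num_future", num_future),
--         ("num_prep", num_prep),
--         ("num_negations", num_negations),
--     ]
--     top = []
--     for item in features:
--         i = 0
--         while i < len(top) and top[i][1] >= item[1]:
--             i += 1
--         top.insert(i, item)
--         del top[needed:]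
--
--     return informative_correlates + [psychological_correlates[f] for f, _ in top]
-- ===== Notes on version B (the rewrite author's own statement) =====
-- stated objective: alternative
-- what changed: Replaces the full descending stable sort of all seven feature counts followed by a take-3 loop with a single pass that maintains a bounded buffer of only the `needed` (at most 3) best (feature, count) pairs via stable insertion-after-ties and truncation.
import Mathlib
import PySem

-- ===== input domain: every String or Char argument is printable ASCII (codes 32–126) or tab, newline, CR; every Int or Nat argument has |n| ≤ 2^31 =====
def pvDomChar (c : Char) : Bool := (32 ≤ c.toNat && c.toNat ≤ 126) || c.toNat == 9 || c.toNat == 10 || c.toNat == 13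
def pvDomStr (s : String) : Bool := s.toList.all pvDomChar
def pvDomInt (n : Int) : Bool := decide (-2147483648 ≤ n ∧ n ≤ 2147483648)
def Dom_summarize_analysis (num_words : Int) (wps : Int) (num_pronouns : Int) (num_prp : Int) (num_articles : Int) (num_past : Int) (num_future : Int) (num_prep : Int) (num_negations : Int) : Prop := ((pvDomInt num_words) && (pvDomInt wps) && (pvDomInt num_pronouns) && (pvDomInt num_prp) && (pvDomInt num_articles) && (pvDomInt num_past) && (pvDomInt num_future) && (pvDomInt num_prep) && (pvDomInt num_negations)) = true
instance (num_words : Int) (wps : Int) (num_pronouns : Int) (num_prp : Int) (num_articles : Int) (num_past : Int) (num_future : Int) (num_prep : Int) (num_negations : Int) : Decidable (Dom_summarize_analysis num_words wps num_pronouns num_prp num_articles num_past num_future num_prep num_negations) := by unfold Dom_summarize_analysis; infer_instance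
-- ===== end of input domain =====

-- B replaces the full descending stable sort + take-3 loop by a single pass keeping a bounded
-- buffer of at most `needed ≤ 3` best (feature, count) pairs (objective: alternative, not faster).

-- ===== PORT A =====
-- the psychological_correlates dict (identical literal in both Python sources)
def pvCorrTable : PySem.Dict String String :=
  (((((((((PySem.Dict.empty.insert "num_words" "Talkativeness, verbal fluency").insert
    "wps" "Verbal fluency, cognitive complexity").insert
    "num_pronouns" "Informal, personal").insert
    "num_prp" "Personal, social").insert
    "num_articles" "Use of concrete nouns, interest in objects/things").insert
    "num_past" "Focused on the past").insert
    "num_future" "Future and goal-oriented").insert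
    "num_prep" "Education, concern with precision").insert
    "num_negations" "Inhibition")

-- A's `for feature, count in sorted_features: if len(...) < 3: append else break`
def pvALoop (sorted_features : List (String × Int)) (ic : List String) : List String :=
  match sorted_features with
  | [] => ic
  | (feature, _) :: rest =>
      if ic.length < 3 then pvALoop rest (ic ++ [pvCorrTable.getD feature ""]) else ic

def summarize_analysis (num_words : Int) (wps : Int) (num_pronouns : Int) (num_prp : Int) (num_articles : Int) (num_past : Int) (num_future : Int) (num_prep : Int) (num_negations : Int) : List String :=
  let informative_correlates : List String := []
  let informative_correlates :=
    if num_words > 100 then informative_correlates ++ [pvCorrTable.getD "num_words" ""]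
    else informative_correlates
  let informative_correlates :=
    if wps > 20 then informative_correlates ++ [pvCorrTable.getD "wps" ""]
    else informative_correlates
  let feature_counts : PySem.Dict String Int :=
    ((((((PySem.Dict.empty.insert "num_pronouns" num_pronouns).insert
      "num_prp" num_prp).insert
      "num_articles" num_articles).insert
      "num_past" num_past).insert
      "num_future" num_future).insert
      "num_prep" num_prep).insert
      "num_negations" num_negations
  let sorted_features := PySem.List.sorted feature_counts.items (fun item => item.2) true
  pvALoop sorted_features informative_correlates

-- ===== PORT B =====
-- Source B's while-loop position search + list.insert: put item after all counts ≥ its count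
def pvBInsert (item : String × Int) (top : List (String × Int)) : List (String × Int) :=
  match top with
  | [] => [item]
  | y :: ys => if y.2 ≥ item.2 then y :: pvBInsert item ys else item :: y :: ys

def summarize_analysis_alt (num_words : Int) (wps : Int) (num_pronouns : Int) (num_prp : Int) (num_articles : Int) (num_past : Int) (num_future : Int) (num_prep : Int) (num_negations : Int) : List String :=
  let informative_correlates : List String :=
    (if num_words > 100 then [pvCorrTable.getD "num_words" ""] else []) ++
    (if wps > 20 then [pvCorrTable.getD "wps" ""] else [])
  let needed : Nat := 3 - informative_correlates.length
  let features : List (String × Int) :=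
    [("num_pronouns", num_pronouns), ("num_prp", num_prp), ("num_articles", num_articles),
     ("num_past", num_past), ("num_future", num_future), ("num_prep", num_prep),
     ("num_negations", num_negations)]
  let top := features.foldl (fun t item => (pvBInsert item t).take needed) []
  informative_correlates ++ top.map (fun p => pvCorrTable.getD p.1 "")

-- ===== PRECONDITION & SPEC =====
def Spec_summarize_analysis (num_words : Int) (wps : Int) (num_pronouns : Int) (num_prp : Int) (num_articles : Int) (num_past : Int) (num_future : Int) (num_prep : Int) (num_negations : Int) (out : List String) : Prop := out = summarize_analysis_alt num_words wps num_pronouns num_prp num_articles num_past num_future num_prep num_negations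
instance (num_words : Int) (wps : Int) (num_pronouns : Int) (num_prp : Int) (num_articles : Int) (num_past : Int) (num_future : Int) (num_prep : Int) (num_negations : Int) (out : List String) : Decidable (Spec_summarize_analysis num_words wps num_pronouns num_prp num_articles num_past num_future num_prep num_negations out) := by unfold Spec_summarize_analysis; infer_instance

-- ===== CLAIM (what is proved, stated in full; the proofs are below) =====
def Claim_equal_summarize_analysis : Prop := ∀ (num_words : Int) (wps : Int) (num_pronouns : Int) (num_prp : Int) (num_articles : Int) (num_past : Int) (num_future : Int) (num_prep : Int) (num_negations : Int), Dom_summarize_analysis num_words wps num_pronouns num_prp num_articles num_past num_future num_prep num_negations → Spec_summarize_analysis num_words wps num_pronouns num_prp num_articles num_past num_future num_prep num_negations (summarize_analysis num_words wps num_pronouns num_prp num_articles num_past num_future num_prep num_negations)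

-- ===== LEMMAS AND PROOFS =====

-- B's insertion is PySem's stable descending insert (new element goes after equal counts)
theorem pvBInsert_eq_insertBy (item : String × Int) (top : List (String × Int)) :
    pvBInsert item top = PySem.List.insertBy (fun a b => decide (b.2 < a.2)) item top := by
  induction top with
  | nil => rfl
  | cons y ys ih =>
      by_cases h : y.2 < item.2
      · simp [pvBInsert, PySem.List.insertBy, h, not_le.mpr h]
      · simp [pvBInsert, PySem.List.insertBy, h, not_lt.1 h, ih]

-- truncating an insertion = inserting into the truncation and truncating
theorem take_insertBy {α : Type} (b : α → α → Bool) (x : α) :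
    ∀ (l : List α) (k : Nat),
      (PySem.List.insertBy b x l).take k = (PySem.List.insertBy b x (l.take k)).take k := by
  intro l
  induction l with
  | nil => intro k; simp
  | cons y ys ih =>
      intro k
      match k with
      | 0 => simp
      | Nat.succ m =>
          by_cases h : b x y
          · simp only [PySem.List.insertBy, h, if_true, List.take_succ_cons]
            cases m with
            | zero => simp
            | succ j => simp [List.take_succ_cons, List.take_take, Nat.min_eq_left (Nat.le_succ j)]
          · simp [PySem.List.insertBy, h, List.take_succ_cons, ih m]

-- a fold of truncated insertions is the truncation of the insertion-sort fold
theorem foldl_take_insertBy {α : Type} (b : α → α → Bool) (k : Nat) :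
    ∀ (l acc : List α),
      (l.foldl (fun a x => PySem.List.insertBy b x a) acc).take k =
        l.foldl (fun a x => (PySem.List.insertBy b x a).take k) (acc.take k) := by
  intro l
  induction l with
  | nil => intro acc; simp
  | cons x xs ih =>
      intro acc
      simp only [List.foldl_cons]
      rw [ih, ← take_insertBy]

-- A's append-until-3 loop appends exactly the first (3 - len) correlates
theorem pvALoop_eq_take :
    ∀ (l : List (String × Int)) (ic : List String),
      pvALoop l ic = ic ++ (l.take (3 - ic.length)).map (fun p => pvCorrTable.getD p.1 "") := by
  intro l
  induction l with
  | nil => intro ic; simp [pvALoop]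
  | cons y rest ih =>
      intro ic
      by_cases h : ic.length < 3
      · have h3 : 3 - ic.length = (3 - (ic.length + 1)) + 1 := by omega
        simp only [pvALoop, h, if_true, ih (ic ++ [pvCorrTable.getD y.1 ""]), h3]
        simp [List.take_succ_cons]
      · have h0 : 3 - ic.length = 0 := by omega
        simp [pvALoop, h, h0]

-- the feature_counts dict iterates as the literal association list
theorem feature_counts_items (a b c d e f g : Int) :
    (((((((PySem.Dict.empty.insert "num_pronouns" a).insert
      "num_prp" b).insert "num_articles" c).insert "num_past" d).insert
      "num_future" e).insert "num_prep" f).insert "num_negations" g).items =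
    [("num_pronouns", a), ("num_prp", b), ("num_articles", c), ("num_past", d),
     ("num_future", e), ("num_prep", f), ("num_negations", g)] := by
  rfl

-- ===== VERDICT (by name: the statement is the Claim_ definition above) =====
theorem summarize_analysis_spec : Claim_equal_summarize_analysis := by
  intro num_words wps num_pronouns num_prp num_articles num_past num_future num_prep num_negations _
  unfold Spec_summarize_analysis summarize_analysis summarize_analysis_alt
  simp only [feature_counts_items, PySem.List.sorted_rev_eq_foldl_insertBy,
    pvBInsert_eq_insertBy, pvALoop_eq_take]
  by_cases h1 : num_words > 100 <;> by_cases h2 : wps > 20 <;>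
    simp only [h1, h2, ite_true, ite_false, List.nil_append, List.append_nil,
      List.singleton_append, List.length_cons, List.length_nil] <;>
    rw [foldl_take_insertBy] <;> norm_num
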